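-- pv_equiv track=rewrite | github.com/nickduncan7/AdventOfCode | day11/day11.py | rule3
-- ===== SOURCE A (Python) =====
-- def rule3(password):
--     count = 0
--     usedIndices = []
--     for i in range(len(password) - 1):
--         try:
--             if password[i] == password[i + 1] and not (i in usedIndices or i + 1 in usedIndices):
--                 count += 1
--                 usedIndices.append(i)
--                 usedIndices.append(i + 1)
--         except IndexError:
--             continue
--
--     return count > 1
-- ===== SOURCE B (Python) =====
-- def rule3(password):
--     count = 0
--     i = 0
--     n = len(password)
--     while i + 1 < n:
--         if password[i] == password[i + 1]:
--             count += 1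
--             if count > 1:
--                 return True
--             i += 2
--         else:
--             i += 1
--     return count > 1
-- ===== Notes on version B (the rewrite author's own statement) =====
-- stated objective: faster
-- what changed: Replaced the quadratic scan with a linear-membership usedIndices list by a single linear pass that skips the consumed index (i += 2) and returns early once two pairs are found.
import Mathlib
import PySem

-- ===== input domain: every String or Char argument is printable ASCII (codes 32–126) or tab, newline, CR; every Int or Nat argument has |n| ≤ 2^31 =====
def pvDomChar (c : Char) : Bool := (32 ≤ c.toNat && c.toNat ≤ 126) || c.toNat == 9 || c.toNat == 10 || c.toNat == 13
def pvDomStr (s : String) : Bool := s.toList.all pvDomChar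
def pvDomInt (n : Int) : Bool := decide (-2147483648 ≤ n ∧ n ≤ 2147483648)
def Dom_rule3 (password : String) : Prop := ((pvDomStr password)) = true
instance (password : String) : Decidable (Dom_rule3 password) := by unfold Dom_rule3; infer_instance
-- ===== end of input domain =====

-- B replaces A's quadratic usedIndices scan by one linear pass that skips the consumed index; faster (asymptotic).


-- ===== PORT A =====
-- one loop iteration of A (the try/except IndexError becomes the 'none' match arms)
def rule3Step (cs : List Char) (st : Int × List Int) (i : Int) : Int × List Int :=
  match PySem.List.pyGet? cs i, PySem.List.pyGet? cs (i + 1) with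
  | some a, some b =>
    if a == b && !(st.2.contains i || st.2.contains (i + 1)) then
      (st.1 + 1, st.2 ++ [i, i + 1])
    else st
  | _, _ => st

def rule3 (password : String) : Bool :=
  let cs := password.toList
  let st := (PySem.List.pyRange 0 ((cs.length : Int) - 1) 1).foldl (rule3Step cs) (0, [])
  decide (st.1 > 1)

-- ===== PORT B =====
-- B's while loop over index i, transcribed on the remaining suffix (i+=2 drops two chars, i+=1 drops one)
def rule3AltGo : List Char → Int → Bool
  | a :: b :: rest, count =>
    if a == b then
      (if count + 1 > 1 then true else rule3AltGo rest (count + 1))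
    else rule3AltGo (b :: rest) count
  | _, count => decide (count > 1)

def rule3_alt (password : String) : Bool := rule3AltGo password.toList 0

-- ===== PRECONDITION & SPEC =====
def Spec_rule3 (password : String) (out : Bool) : Prop := out = rule3_alt password
instance (password : String) (out : Bool) : Decidable (Spec_rule3 password out) := by unfold Spec_rule3; infer_instance

-- ===== CLAIM (what is proved, stated in full; the proofs are below) =====
def Claim_equal_rule3 : Prop := ∀ (password : String), Dom_rule3 password → Spec_rule3 password (rule3 password)

-- ===== LEMMAS AND PROOFS =====

-- greedy left-to-right count of non-overlapping adjacent equal pairs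
def gcount : List Char → Int
  | a :: b :: rest => if a == b then 1 + gcount rest else gcount (b :: rest)
  | _ => 0

lemma gcount_nonneg (cs : List Char) : 0 ≤ gcount cs := by
  induction cs using gcount.induct with
  | case1 a b rest hab ih => simp [gcount, hab]; omega
  | case2 a b rest hab ih => simpa [gcount, hab] using ih
  | case3 t h =>
    match t, h with
    | [], _ => simp [gcount]
    | [a], _ => simp [gcount]
    | a :: b :: rest, h => exact absurd rfl (h a b rest)

lemma gcount_short (cs : List Char) (h : cs.length ≤ 1) : gcount cs = 0 := by
  match cs, h with
  | [], _ => rfl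
  | [a], _ => rfl

lemma altGo_eq (cs : List Char) (c : Int) :
    rule3AltGo cs c = decide (c + gcount cs > 1) := by
  induction cs, c using rule3AltGo.induct with
  | case1 a b rest c hab hc =>
    have := gcount_nonneg rest
    simp [rule3AltGo, gcount, hab, hc]
    omega
  | case2 a b rest c hab hc ih =>
    rw [show rule3AltGo (a :: b :: rest) c = rule3AltGo rest (c + 1) by
      simp [rule3AltGo, hab, hc], ih]
    simp [gcount, hab]
    constructor <;> (intro; omega)
  | case3 a b rest c hab ih =>
    rw [show rule3AltGo (a :: b :: rest) c = rule3AltGo (b :: rest) c by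
      simp [rule3AltGo, hab], ih]
    simp [gcount, hab]
  | case4 t c h =>
    match t, h with
    | [], _ => simp [rule3AltGo, gcount]
    | [a], _ => simp [rule3AltGo, gcount]
    | a :: b :: rest, h => exact absurd rfl (h a b rest)

-- A's loop from index k, with all recorded indices ≤ k, computes c + the greedy count of what remains
lemma loopA (cs : List Char) (n : Nat) : ∀ (k : Nat) (c : Int) (used : List Int),
    cs.length - k = n →
    (∀ j ∈ used, j ≤ (k : Int)) →
    ((PySem.List.pyRange (k : Int) ((cs.length : Int) - 1) 1).foldl (rule3Step cs) (c, used)).1 =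
      c + (if (k : Int) ∈ used then gcount (cs.drop (k + 1)) else gcount (cs.drop k)) := by
  induction n with
  | zero =>
    intro k c used hn hb
    have hk : cs.length ≤ k := by omega
    rw [PySem.List.pyRange_one_eq_nil (by omega : ((cs.length : Int) - 1) ≤ (k : Int))]
    simp only [List.foldl_nil]
    rw [gcount_short _ (by simp; omega), gcount_short _ (by simp; omega)]
    split <;> ring
  | succ n ih =>
    intro k c used hn hb
    by_cases hk : k + 1 < cs.length
    · have hlt : (k : Int) < (cs.length : Int) - 1 := by omega
      rw [PySem.List.pyRange_one_cons hlt, List.foldl_cons]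
      have hk0 : k < cs.length := by omega
      have hga : PySem.List.pyGet? cs (k : Int) = some cs[k] := by
        rw [PySem.List.pyGet?_natCast]; simp [List.getElem?_eq_getElem hk0]
      have hgb : PySem.List.pyGet? cs ((k : Int) + 1) = some cs[k+1] := by
        have : (k : Int) + 1 = ((k+1 : Nat) : Int) := by push_cast; ring
        rw [this, PySem.List.pyGet?_natCast]; simp [List.getElem?_eq_getElem hk]
      have hdrop : cs.drop k = cs[k] :: cs[k+1] :: cs.drop (k+2) := by
        rw [List.drop_eq_getElem_cons hk0, List.drop_eq_getElem_cons hk]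
      have hdrop1 : cs.drop (k+1) = cs[k+1] :: cs.drop (k+2) := List.drop_eq_getElem_cons hk
      have hcast : ((k : Int) + 1) = ((k+1 : Nat) : Int) := by push_cast; ring
      by_cases hku : (k : Int) ∈ used
      · -- index k already consumed: condition false, state unchanged
        have hcond : rule3Step cs (c, used) (k : Int) = (c, used) := by
          simp only [rule3Step, hga, hgb]
          rw [if_neg]
          simp [hku]
        rw [hcond, hcast, ih (k+1) c used (by omega)
          (by intro j hj; have := hb j hj; push_cast; omega)]
        have hnot : ((k+1 : Nat) : Int) ∉ used := by
          intro h; have := hb _ h; push_cast at this; omega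
        rw [if_neg hnot, if_pos hku]
      · by_cases hab : cs[k] == cs[k+1]
        · -- fresh pair: consume it
          have hnot1 : (k : Int) + 1 ∉ used := by
            intro h; have := hb _ h; omega
          have hcond : rule3Step cs (c, used) (k : Int) = (c + 1, used ++ [(k : Int), (k : Int) + 1]) := by
            simp only [rule3Step, hga, hgb]
            rw [if_pos]
            simp [hab, hku, hnot1]
          rw [hcond, hcast, ih (k+1) (c+1) _ (by omega)
            (by intro j hj; simp at hj
                rcases hj with hj | hj | hj
                · have := hb j hj; push_cast; omega
                · subst hj; push_cast; omega
                · rw [hj]; push_cast; omega)]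
          have hin : ((k+1 : Nat) : Int) ∈ used ++ [(k : Int), ((k+1 : Nat) : Int)] := by simp
          rw [if_pos hin, if_neg hku]
          rw [show k + 1 + 1 = k + 2 by omega, hdrop, gcount]
          simp only [hab, if_true]; ring
        · -- no pair here: move on
          have hcond : rule3Step cs (c, used) (k : Int) = (c, used) := by
            simp [rule3Step, hga, hgb, hab]
          rw [hcond, hcast, ih (k+1) c used (by omega)
            (by intro j hj; have := hb j hj; push_cast; omega)]
          have hnot : ((k+1 : Nat) : Int) ∉ used := by
            intro h; have := hb _ h; push_cast at this; omega
          rw [if_neg hnot, if_neg hku, hdrop1, hdrop, gcount]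
          simp [hab]
    · -- loop over: k+1 ≥ length, range empty
      rw [PySem.List.pyRange_one_eq_nil (by omega)]
      simp only [List.foldl_nil]
      rw [gcount_short _ (by simp; omega), gcount_short _ (by simp; omega)]
      split <;> ring

-- ===== VERDICT (by name: the statement is the Claim_ definition above) =====
theorem rule3_spec : Claim_equal_rule3 := by
  intro password _
  unfold Spec_rule3 rule3 rule3_alt
  have h := loopA password.toList (password.toList.length) 0 0 [] (by omega) (by simp)
  rw [show ((0 : Nat) : Int) = (0 : Int) from rfl] at h
  simp only [h]
  rw [altGo_eq]
  simp
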